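-- pv_equiv track=rewrite | github.com/pavelraiden/noktvrn_ai_artist | artist_builder/integration/artist_orchestrator_integration.py | _extract_final_prompt
-- ===== SOURCE A (Python) =====
-- def _extract_final_prompt(orchestration_content: str) -> str:
--     """
--     Extract the final prompt from the orchestration result content.
--
--     Args:
--         orchestration_content: The content from the orchestration result
--
--     Returns:
--         The extracted final prompt
--     """
--     # For mock implementations, the content might be the full response
--     # In a real implementation, we would parse the structured response
--
--     # Simple extraction: look for the last occurrence of text that looks like a prompt
--     lines = orchestration_content.split("\n")
--     prompt_lines = []
--     in_prompt_section = False
--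
--     for line in lines:
--         line = line.strip()
--
--         # Look for markers that might indicate the start of the final prompt
--         if (
--             "final prompt" in line.lower()
--             or "improved prompt" in line.lower()
--             or "refined prompt" in line.lower()
--         ):
--             in_prompt_section = True
--             prompt_lines = []  # Reset to capture only the latest prompt
--             continue
--
--         # If we're in a prompt section, collect lines until we hit a section marker
--         if in_prompt_section:
--             if line.startswith("#") or line.startswith("##") or not line:
--                 if prompt_lines:  # Only end if we've collected something
--                     in_prompt_section = False
--             else:
--                 prompt_lines.append(line)
--
--     # If we didn't find a clearly marked prompt section, use heuristics
--     if not prompt_lines: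
--         # Look for the longest paragraph that doesn't look like feedback
--         paragraphs = orchestration_content.split("\n\n")
--         candidate_prompt = ""
--
--         for paragraph in paragraphs:
--             paragraph = paragraph.strip()
--             if len(paragraph) > len(candidate_prompt) and not any(
--                 x in paragraph.lower()
--                 for x in ["feedback", "review", "suggestion", "improve"]
--             ):
--                 candidate_prompt = paragraph
--
--         if candidate_prompt:
--             return candidate_prompt
--
--         # Fallback: just return the whole content
--         return orchestration_content
--
--     return "\n".join(prompt_lines)
-- ===== SOURCE B (Python) =====
-- def _is_marker(stripped_line):
--     low = stripped_line.lower()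
--     return ("final prompt" in low or "improved prompt" in low
--             or "refined prompt" in low)
--
--
-- def _fallback(content):
--     good = [p for p in (q.strip() for q in content.split("\n\n"))
--             if p and not any(x in p.lower()
--                              for x in ("feedback", "review", "suggestion", "improve"))]
--     return max(good, key=len) if good else content
--
--
-- def _extract_final_prompt(orchestration_content: str) -> str:
--     lines = orchestration_content.split("\n")
--
--     # Pass 1: locate -- keep exactly the raw lines AFTER the last marker line.
--     tail = None
--     for raw in lines:
--         if _is_marker(raw.strip()):
--             tail = []
--         elif tail is not None:
--             tail.append(raw)
--
--     # Pass 2: extract -- skip leading blank/'#' lines, collect stripped content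
--     # lines, stop at the first blank/'#' line once something was collected.
--     if tail is not None:
--         collected = []
--         for raw in tail:
--             s = raw.strip()
--             if not s or s.startswith("#"):
--                 if collected:
--                     break
--             else:
--                 collected.append(s)
--         if collected:
--             return "\n".join(collected)
--
--     return _fallback(orchestration_content)
-- ===== Notes on version B (the rewrite author's own statement) =====
-- stated objective: alternative
-- what changed: Replaces A's single flag-driven pass (in_prompt_section state machine with reset-on-marker) by a locate-then-extract decomposition: one pass keeps the raw lines after the last marker line, a second pass extracts the prompt block from that tail, and the fallback becomes a separate filter-then-longest helper.
import Mathlib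
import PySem

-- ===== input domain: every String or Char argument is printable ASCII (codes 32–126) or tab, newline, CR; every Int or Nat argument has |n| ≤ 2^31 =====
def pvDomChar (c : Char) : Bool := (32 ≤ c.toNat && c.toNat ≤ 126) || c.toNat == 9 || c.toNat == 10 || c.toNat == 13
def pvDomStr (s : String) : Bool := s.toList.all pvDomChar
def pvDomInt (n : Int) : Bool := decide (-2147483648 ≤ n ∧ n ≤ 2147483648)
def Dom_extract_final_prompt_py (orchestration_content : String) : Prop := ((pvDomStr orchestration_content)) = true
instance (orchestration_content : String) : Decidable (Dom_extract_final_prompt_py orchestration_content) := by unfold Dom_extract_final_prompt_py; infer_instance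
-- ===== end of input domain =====

-- B replaces A's single flag-driven pass by a locate-then-extract decomposition
-- (pass 1 keeps the raw lines after the last marker, pass 2 extracts the block);
-- objective: alternative/simpler decomposition, no speed claim.

-- ===== PORT A =====

-- s.split(sep) for a non-empty literal sep (split? is none only for sep = "")
def pvSplit (s sep : String) : List String := (PySem.Str.split? s sep).getD []


-- "final prompt"/"improved prompt"/"refined prompt" in line.lower()
def pvMarkerStr (line : String) : Bool :=
  let low := PySem.Str.lower line
  PySem.Str.isIn "final prompt" low || PySem.Str.isIn "improved prompt" low ||
    PySem.Str.isIn "refined prompt" low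

-- any(x in paragraph.lower() for x in ["feedback","review","suggestion","improve"])
def pvBad (paragraph : String) : Bool :=
  let low := PySem.Str.lower paragraph
  PySem.Str.isIn "feedback" low || PySem.Str.isIn "review" low ||
    PySem.Str.isIn "suggestion" low || PySem.Str.isIn "improve" low

-- A's main loop: state = (prompt_lines, in_prompt_section)
def pvLoopA : List String → List String → Bool → List String
  | [], prompt_lines, _ => prompt_lines
  | l :: ls, prompt_lines, in_sec =>
    let line := PySem.Str.strip l
    if pvMarkerStr line then
      pvLoopA ls [] true
    else if in_sec then
      if PySem.Str.startswith line "#" || PySem.Str.startswith line "##" || line == "" then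
        if prompt_lines ≠ [] then pvLoopA ls prompt_lines false
        else pvLoopA ls prompt_lines in_sec
      else pvLoopA ls (prompt_lines ++ [line]) true
    else pvLoopA ls prompt_lines in_sec

-- A's fallback loop over paragraphs, accumulating candidate_prompt
def pvCandA : List String → String → String
  | [], candidate => candidate
  | p :: ps, candidate =>
    let q := PySem.Str.strip p
    if PySem.Str.len candidate < PySem.Str.len q ∧ pvBad q = false then pvCandA ps q
    else pvCandA ps candidate

def extract_final_prompt_py (orchestration_content : String) : String :=
  let lines := pvSplit orchestration_content "\n"
  let prompt_lines := pvLoopA lines [] false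
  if prompt_lines = [] then
    let paragraphs := pvSplit orchestration_content "\n\n"
    let candidate := pvCandA paragraphs ""
    if candidate ≠ "" then candidate
    else orchestration_content
  else PySem.Str.join "\n" prompt_lines

-- ===== PORT B =====

-- pass 1: tail = raw lines after the last marker line (none if no marker)
def pvTailB : List String → Option (List String) → Option (List String)
  | [], t => t
  | l :: ls, t =>
    if pvMarkerStr (PySem.Str.strip l) then pvTailB ls (some [])
    else match t with
      | none => pvTailB ls none
      | some ts => pvTailB ls (some (ts ++ [l]))

-- pass 2: skip leading blank/'#' lines, collect stripped content lines, break after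
def pvCollectB : List String → List String → List String
  | [], acc => acc
  | l :: ls, acc =>
    let s := PySem.Str.strip l
    if s == "" || PySem.Str.startswith s "#" then
      if acc ≠ [] then acc else pvCollectB ls acc
    else pvCollectB ls (acc ++ [s])

-- best = ""; for p in good: if len(p) > len(best): best = p
def pvBestB : List String → String → String
  | [], best => best
  | p :: ps, best =>
    if PySem.Str.len best < PySem.Str.len p then pvBestB ps p else pvBestB ps best

-- _fallback: longest stripped non-empty paragraph without a feedback word, else content
def pvFallbackB (content : String) : String :=
  let good := ((pvSplit content "\n\n").map PySem.Str.strip).filter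
      (fun p => !(p == "") && !pvBad p)
  let best := pvBestB good ""
  if best ≠ "" then best else content

def extract_final_prompt_py_alt (orchestration_content : String) : String :=
  let lines := pvSplit orchestration_content "\n"
  match pvTailB lines none with
  | some ts =>
    let collected := pvCollectB ts []
    if collected ≠ [] then PySem.Str.join "\n" collected
    else pvFallbackB orchestration_content
  | none => pvFallbackB orchestration_content

-- ===== PRECONDITION & SPEC =====
def Spec_extract_final_prompt_py (orchestration_content : String) (out : String) : Prop := out = extract_final_prompt_py_alt orchestration_content
instance (orchestration_content : String) (out : String) : Decidable (Spec_extract_final_prompt_py orchestration_content out) := by unfold Spec_extract_final_prompt_py; infer_instance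

-- ===== CLAIM (what is proved, stated in full; the proofs are below) =====
def Claim_equal_extract_final_prompt_py : Prop := ∀ (orchestration_content : String), Dom_extract_final_prompt_py orchestration_content → Spec_extract_final_prompt_py orchestration_content (extract_final_prompt_py orchestration_content)

-- ===== LEMMAS AND PROOFS =====

-- marker test on a raw (unstripped) line
def pvM (l : String) : Bool := pvMarkerStr (PySem.Str.strip l)

-- the raw lines after the last marker line
def pvAfterLast : List String → List String
  | [] => []
  | _ :: t => if t.any pvM then pvAfterLast t else t

-- startswith "##" implies startswith "#", so A's blank/marker test equals B's
theorem pv_start_eq (s : String) :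
    (PySem.Str.startswith s "#" || PySem.Str.startswith s "##" || (s == "")) =
      ((s == "") || PySem.Str.startswith s "#") := by
  have h2 : PySem.Str.startswith s "##" = true → PySem.Str.startswith s "#" = true := by
    intro h
    rw [PySem.Str.startswith_eq, PySem.Chars.startswith_iff] at h ⊢
    exact List.IsPrefix.trans (by decide) h
  cases h1 : PySem.Str.startswith s "#"
  · cases h2' : PySem.Str.startswith s "##"
    · simp
    · exact absurd (h2 h2') (by rw [h1]; exact Bool.false_ne_true)
  · simp

theorem pvLoopA_false (ls : List String) (pl : List String) (h : ls.any pvM = false) :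
    pvLoopA ls pl false = pl := by
  induction ls with
  | nil => rfl
  | cons a t ih =>
    simp only [List.any_cons, Bool.or_eq_false_iff] at h
    simp only [pvLoopA]
    rw [show pvMarkerStr (PySem.Str.strip a) = false from h.1]
    simpa using ih h.2

theorem pvLoopA_true (ls : List String) (acc : List String) (h : ls.any pvM = false) :
    pvLoopA ls acc true = pvCollectB ls acc := by
  induction ls generalizing acc with
  | nil => rfl
  | cons a t ih =>
    simp only [List.any_cons, Bool.or_eq_false_iff] at h
    simp only [pvLoopA, pvCollectB]
    rw [show pvMarkerStr (PySem.Str.strip a) = false from h.1, pv_start_eq]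
    rw [if_neg Bool.false_ne_true, if_pos trivial]
    by_cases hb : ((PySem.Str.strip a == "") || PySem.Str.startswith (PySem.Str.strip a) "#") = true
    · rw [if_pos hb, if_pos hb]
      by_cases hacc : acc ≠ []
      · rw [if_pos hacc, if_pos hacc, pvLoopA_false t acc h.2]
      · rw [if_neg hacc, if_neg hacc, ih _ h.2]
    · rw [if_neg hb, if_neg hb, ih _ h.2]

theorem pvLoopA_marker (ls : List String) (h : ls.any pvM = true) :
    ∀ (pl : List String) (f : Bool), pvLoopA ls pl f = pvCollectB (pvAfterLast ls) [] := by
  induction ls with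
  | nil => simp at h
  | cons a t ih =>
    intro pl f
    by_cases ht : t.any pvM = true
    · rw [show pvAfterLast (a :: t) = pvAfterLast t from by simp [pvAfterLast, ht]]
      simp only [pvLoopA]
      split_ifs <;> exact ih ht _ _
    · rw [Bool.not_eq_true] at ht
      have hm : pvMarkerStr (PySem.Str.strip a) = true := by
        simp only [List.any_cons, ht, Bool.or_false] at h; exact h
      rw [show pvAfterLast (a :: t) = t from by simp [pvAfterLast, ht]]
      simp only [pvLoopA, hm]
      rw [if_pos trivial]
      exact pvLoopA_true t [] ht

theorem pvTailB_none (ls : List String) (h : ls.any pvM = false) :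
    pvTailB ls none = none := by
  induction ls with
  | nil => rfl
  | cons a t ih =>
    simp only [List.any_cons, Bool.or_eq_false_iff] at h
    simp only [pvTailB]
    rw [show pvMarkerStr (PySem.Str.strip a) = false from h.1]
    simpa using ih h.2

theorem pvTailB_some (ls : List String) (h : ls.any pvM = false) (ts : List String) :
    pvTailB ls (some ts) = some (ts ++ ls) := by
  induction ls generalizing ts with
  | nil => simp [pvTailB]
  | cons a t ih =>
    simp only [List.any_cons, Bool.or_eq_false_iff] at h
    simp only [pvTailB]
    rw [show pvMarkerStr (PySem.Str.strip a) = false from h.1,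
      if_neg Bool.false_ne_true]
    simp [ih h.2]

theorem pvTailB_marker (ls : List String) (h : ls.any pvM = true) :
    ∀ t, pvTailB ls t = some (pvAfterLast ls) := by
  induction ls with
  | nil => simp at h
  | cons a t ih =>
    intro t0
    by_cases ht : t.any pvM = true
    · rw [show pvAfterLast (a :: t) = pvAfterLast t from by simp [pvAfterLast, ht]]
      simp only [pvTailB]
      split_ifs
      · exact ih ht _
      · cases t0 <;> exact ih ht _
    · rw [Bool.not_eq_true] at ht
      have hm : pvMarkerStr (PySem.Str.strip a) = true := by
        simp only [List.any_cons, ht, Bool.or_false] at h; exact h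
      rw [show pvAfterLast (a :: t) = t from by simp [pvAfterLast, ht]]
      simp only [pvTailB, hm]
      rw [if_pos trivial]
      simpa using pvTailB_some t ht []

theorem pvCand_eq (ps : List String) (c : String) :
    pvCandA ps c = pvBestB ((ps.map PySem.Str.strip).filter (fun p => !(p == "") && !pvBad p)) c := by
  induction ps generalizing c with
  | nil => rfl
  | cons p ps ih =>
    simp only [pvCandA, List.map_cons, List.filter_cons]
    by_cases hbad : pvBad (PySem.Str.strip p) = true
    · rw [if_neg (by simp [hbad]), if_neg (by simp [hbad])]
      exact ih c
    · rw [Bool.not_eq_true] at hbad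
      by_cases hemp : (PySem.Str.strip p == "") = true
      · have he : PySem.Str.strip p = "" := by simpa using hemp
        rw [if_neg (by
          rw [he]
          intro hcon
          have h1 := hcon.1
          rw [PySem.Str.len_eq, PySem.Str.len_eq] at h1
          simp at h1
          omega), if_neg (by simp [hemp])]
        exact ih c
      · have hg : (!(PySem.Str.strip p == "") && !pvBad (PySem.Str.strip p)) = true := by
          simp [hemp, hbad]
        by_cases hlt : PySem.Str.len c < PySem.Str.len (PySem.Str.strip p)
        · rw [if_pos ⟨hlt, hbad⟩, if_pos hg]
          simp only [pvBestB]
          rw [if_pos hlt]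
          exact ih _
        · rw [if_neg (fun hcon => hlt hcon.1), if_pos hg]
          simp only [pvBestB]
          rw [if_neg hlt]
          exact ih c

theorem pv_fallback_eq (content : String) :
    (let paragraphs := pvSplit content "\n\n"
     let candidate := pvCandA paragraphs ""
     if candidate ≠ "" then candidate else content) = pvFallbackB content := by
  simp only [pvFallbackB, pvCand_eq]

-- ===== VERDICT (by name: the statement is the Claim_ definition above) =====
theorem extract_final_prompt_py_spec : Claim_equal_extract_final_prompt_py := by
  intro c _
  unfold Spec_extract_final_prompt_py extract_final_prompt_py extract_final_prompt_py_alt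
  dsimp only
  by_cases h : (pvSplit c "\n").any pvM = true
  · rw [pvTailB_marker _ h, pvLoopA_marker _ h]
    by_cases hc : pvCollectB (pvAfterLast (pvSplit c "\n")) [] = []
    · simp [hc, ← pv_fallback_eq]
    · simp [hc]
  · rw [Bool.not_eq_true] at h
    rw [pvTailB_none _ h, pvLoopA_false _ _ h]
    simp [← pv_fallback_eq]
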